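-- pv_equiv track=rewrite | github.com/iamjuli0/programas-UFAM | 1° periodo/IC/bloco3.py | mapea_pedra
-- ===== SOURCE A (Python) =====
-- def find_indexs(lado_a, mesa):
--     indece = []
--     for ind in range(0, len(mesa)):
--         if len(mesa[ind]) != 0 and lado_a == mesa[ind][0]:
--             indece.append(ind)
--     return indece
--
-- def ponta_que_entra(pedra, ponta):
--     if pedra[0] == ponta[0] and pedra[0] != pedra[1]:
--         return [pedra[1]]
--     elif pedra[0] == ponta[0] and pedra[0] == pedra[1]:
--         return [pedra[0], pedra[1]]
--     else:
--         return [pedra[0]]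
--
-- def joga_pedra(pedra, mesa, index):
--
--     valores_anteriores = mesa[:index]
--     if len(mesa) != index + 1:
--         valores_posteriores = mesa[(index + 1) :]
--     else:
--         valores_posteriores = ()
--
--     return (
--         valores_anteriores
--         + (ponta_que_entra(pedra, mesa[index]),)
--         + valores_posteriores
--     )
--
-- def head(xs):
-- 	return xs[0]
--
-- def tail(xs):
-- 	return [x for x in xs][1:]
--
-- def suma(values):
--     if len(values) == 0:
--         return 0
--
--     return head(values) + suma(tail(values))
--
-- def sum_pontas(pontas):
--     if len(pontas) == 0:
--         return 0
--     return suma(pontas[0]) + sum_pontas(pontas[1:])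
--
-- def m_mais_ponto(pedra, mesa):
--
--     indexs = find_indexs(pedra[0], mesa) + find_indexs(pedra[1], mesa)
--
--     maior_ponto = 0
--     maior_ponto_index = 0
--
--     for inx in indexs:
--         if maior_ponto <= sum_pontas(joga_pedra(pedra, mesa, inx)):
--             maior_ponto = sum_pontas(joga_pedra(pedra, mesa, inx))
--             maior_ponto_index = inx
--
--     return (maior_ponto, maior_ponto_index)
--
-- def mapea_pedra(mao_do_jogador, mesa):
--
--     mior_ponto = 0
--
--     pedras = []
--
--     for pedra in mao_do_jogador:
--         m_ponto, m_ponto_index = m_mais_ponto(pedra, mesa)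
--         if m_ponto > mior_ponto:
--             mior_ponto = m_ponto
--             pedras = [(pedra, m_ponto, m_ponto_index)]
--         elif m_ponto == mior_ponto:
--             pedras.append((pedra, m_ponto, m_ponto_index))
--
--     return pedras
-- ===== SOURCE B (Python) =====
-- def mapea_pedra(mao_do_jogador, mesa):
--     total = sum(sum(row) for row in mesa)
--     scored = []
--     for pedra in mao_do_jogador:
--         a, b = pedra[0], pedra[1]
--         best, best_i = 0, 0
--         for side in (a, b):
--             for i, row in enumerate(mesa):
--                 if row and row[0] == side:
--                     repl = ([a, b] if a == b else [b]) if row[0] == a else [a]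
--                     cand = total - sum(row) + sum(repl)
--                     if best <= cand:
--                         best, best_i = cand, i
--         scored.append((pedra, best, best_i))
--     if not scored:
--         return []
--     m = max(t[1] for t in scored)
--     return [t for t in scored if t[1] == m]
-- ===== Notes on version B (the rewrite author's own statement) =====
-- stated objective: faster
-- what changed: B precomputes the board total once and scores each candidate placement as a delta (total - replaced end sum + new end sum) in a single enumerate scan, instead of rebuilding the whole board and re-summing it recursively twice per candidate; the winners are collected by max-then-filter instead of A's sequential reset/append loop.
import Mathlib
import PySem

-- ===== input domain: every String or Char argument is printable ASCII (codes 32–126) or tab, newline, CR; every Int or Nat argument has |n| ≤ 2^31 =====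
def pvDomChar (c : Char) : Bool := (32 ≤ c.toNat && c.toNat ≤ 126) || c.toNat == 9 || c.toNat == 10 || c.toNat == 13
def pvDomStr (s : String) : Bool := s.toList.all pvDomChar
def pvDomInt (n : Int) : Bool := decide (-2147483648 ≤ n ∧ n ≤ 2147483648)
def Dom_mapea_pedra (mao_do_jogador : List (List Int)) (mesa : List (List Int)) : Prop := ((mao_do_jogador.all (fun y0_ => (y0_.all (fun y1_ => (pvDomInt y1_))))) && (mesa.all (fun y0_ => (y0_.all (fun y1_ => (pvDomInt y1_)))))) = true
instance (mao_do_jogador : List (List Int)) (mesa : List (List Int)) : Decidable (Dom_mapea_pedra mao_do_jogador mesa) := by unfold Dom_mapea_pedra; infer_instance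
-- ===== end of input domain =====

-- B scores each candidate placement by a delta against a precomputed board total and picks winners
-- by max-then-filter, instead of A's recursive whole-board re-summing per candidate and sequential
-- reset/append collection loop.


-- ===== PORT A =====
def find_indexs (lado_a : Int) (mesa : List (List Int)) : List Int :=
  (PySem.List.pyRange 0 (mesa.length : Int) 1).foldl
    (fun indece ind =>
      if (PySem.List.pyGetD mesa ind []).length ≠ 0 ∧
         PySem.List.pyGetD (PySem.List.pyGetD mesa ind []) 0 0 = lado_a
      then indece ++ [ind] else indece) []
  -- mesa[ind] exact (ind in range); mesa[ind][0] exact (nonemptiness checked first)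

def ponta_que_entra (pedra ponta : List Int) : List Int :=
  -- pedra[0], pedra[1], ponta[0]: exact whenever it is reached (caller guards ponta ≠ [];
  -- pieces of length < 2 make Python raise IndexError and are outside Pre_)
  let p0 := PySem.List.pyGetD pedra 0 0
  let p1 := PySem.List.pyGetD pedra 1 0
  let q0 := PySem.List.pyGetD ponta 0 0
  if p0 = q0 ∧ p0 ≠ p1 then [p1]
  else if p0 = q0 ∧ p0 = p1 then [p0, p1]
  else [p0]

def joga_pedra (pedra : List Int) (mesa : List (List Int)) (index : Int) : List (List Int) :=
  -- mesa is passed as a Python tuple, so the slices/concatenation are exact; index is always in range here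
  let valores_anteriores := PySem.List.slice mesa none (some index)
  let valores_posteriores :=
    if (mesa.length : Int) ≠ index + 1 then PySem.List.slice mesa (some (index + 1)) none else []
  valores_anteriores ++ [ponta_que_entra pedra (PySem.List.pyGetD mesa index [])] ++ valores_posteriores

def suma : List Int → Int
  | [] => 0
  | x :: xs => x + suma xs   -- head(values) + suma(tail(values))

def sum_pontas : List (List Int) → Int
  | [] => 0
  | p :: ps => suma p + sum_pontas ps

def m_mais_ponto (pedra : List Int) (mesa : List (List Int)) : Int × Int :=
  let indexs := find_indexs (PySem.List.pyGetD pedra 0 0) mesa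
                ++ find_indexs (PySem.List.pyGetD pedra 1 0) mesa
  indexs.foldl
    (fun (st : Int × Int) inx =>
      if st.1 ≤ sum_pontas (joga_pedra pedra mesa inx) then
        (sum_pontas (joga_pedra pedra mesa inx), inx)
      else st)
    (0, 0)

def mapea_pedra (mao_do_jogador : List (List Int)) (mesa : List (List Int)) : List (List Int × Int × Int) :=
  (mao_do_jogador.foldl
    (fun (st : Int × List (List Int × Int × Int)) pedra =>
      let m := m_mais_ponto pedra mesa
      if st.1 < m.1 then (m.1, [(pedra, m.1, m.2)])
      else if m.1 = st.1 then (st.1, st.2 ++ [(pedra, m.1, m.2)])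
      else st)
    (0, [])).2

-- ===== PORT B =====
def pvScore (pedra : List Int) (mesa : List (List Int)) (total : Int) : Int × Int :=
  let a := PySem.List.pyGetD pedra 0 0   -- pedra[0]; pieces of length < 2 raise in Python, outside Pre_
  let b := PySem.List.pyGetD pedra 1 0   -- pedra[1]
  [a, b].foldl
    (fun st side =>
      (PySem.List.enumerate mesa 0).foldl
        (fun (st : Int × Int) ir =>
          if ir.2 ≠ [] ∧ PySem.List.pyGetD ir.2 0 0 = side then
            let repl := if PySem.List.pyGetD ir.2 0 0 = a then (if a = b then [a, b] else [b]) else [a]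
            let cand := total - ir.2.sum + repl.sum
            if st.1 ≤ cand then (cand, ir.1) else st
          else st)
        st)
    (0, 0)

def mapea_pedra_alt (mao_do_jogador : List (List Int)) (mesa : List (List Int)) : List (List Int × Int × Int) :=
  let total := (mesa.map (fun row => row.sum)).sum
  let scored := mao_do_jogador.map (fun pedra => (pedra, pvScore pedra mesa total))
  match scored with
  | [] => []
  | t :: ts =>
    let m := (t :: ts).foldl (fun acc u => max acc u.2.1) t.2.1   -- max(t[1] for t in scored)
    (t :: ts).filter (fun u => u.2.1 = m)

-- ===== PRECONDITION & SPEC =====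
-- Pre_ excludes exactly the inputs on which Python A raises IndexError: a hand piece with
-- fewer than 2 entries (pedra[1] in m_mais_ponto). B raises there too; no input on which A
-- returns is excluded.
def Pre_mapea_pedra (mao_do_jogador : List (List Int)) (mesa : List (List Int)) : Prop :=
  ∀ p ∈ mao_do_jogador, 2 ≤ p.length
instance (mao_do_jogador : List (List Int)) (mesa : List (List Int)) : Decidable (Pre_mapea_pedra mao_do_jogador mesa) := by unfold Pre_mapea_pedra; infer_instance
def pvWitness_mapea_pedra : List (List Int) × List (List Int) := ([[1, 2], [2, 2]], [[2, 4], []])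

def Spec_mapea_pedra (mao_do_jogador : List (List Int)) (mesa : List (List Int)) (out : List (List Int × Int × Int)) : Prop := out = mapea_pedra_alt mao_do_jogador mesa
instance (mao_do_jogador : List (List Int)) (mesa : List (List Int)) (out : List (List Int × Int × Int)) : Decidable (Spec_mapea_pedra mao_do_jogador mesa out) := by unfold Spec_mapea_pedra; infer_instance

-- ===== CLAIM (what is proved, stated in full; the proofs are below) =====
def Claim_equal_mapea_pedra : Prop := ∀ (mao_do_jogador : List (List Int)) (mesa : List (List Int)), Dom_mapea_pedra mao_do_jogador mesa → Pre_mapea_pedra mao_do_jogador mesa → Spec_mapea_pedra mao_do_jogador mesa (mapea_pedra mao_do_jogador mesa)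

-- ===== LEMMAS AND PROOFS =====

lemma suma_eq (l : List Int) : suma l = l.sum := by
  induction l with
  | nil => rfl
  | cons x xs ih => simp [suma, ih]

lemma sum_pontas_eq (ls : List (List Int)) : sum_pontas ls = (ls.map (fun r => r.sum)).sum := by
  induction ls with
  | nil => rfl
  | cons r rs ih => simp [sum_pontas, suma_eq, ih]

lemma enumerate_eq_range {α : Type} (d : α) (xs : List α) (s : Int) :
    PySem.List.enumerate xs s = (List.range xs.length).map (fun k : Nat => (((s + k : Int)), xs.getD k d)) := by
  induction xs generalizing s with
  | nil => simp [PySem.List.enumerate]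
  | cons x t ih =>
    rw [PySem.List.enumerate_cons, ih]
    simp only [List.length_cons, List.range_succ_eq_map, List.map_cons, List.map_map]
    refine List.cons_eq_cons.mpr ⟨by simp, ?_⟩
    apply List.map_congr_left
    intro k _
    simp only [Function.comp, Prod.mk.injEq]
    constructor
    · push_cast; ring
    · simp

-- the board rebuilt by joga_pedra sums to: total − replaced end + new end
lemma joga_sum (pedra : List Int) (mesa : List (List Int)) (k : Nat) (hk : k < mesa.length) :
    sum_pontas (joga_pedra pedra mesa (k : Int)) =
      (mesa.map (fun r => r.sum)).sum - (mesa.getD k []).sum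
        + (ponta_que_entra pedra (mesa.getD k [])).sum := by
  have hget : PySem.List.pyGetD mesa (k : Int) [] = mesa.getD k [] := by
    rw [PySem.List.pyGetD_of_nonneg _ _ (by positivity)]; simp
  have hpost : (if (mesa.length : Int) ≠ (k : Int) + 1
      then PySem.List.slice mesa (some ((k : Int) + 1)) none else []) = mesa.drop (k + 1) := by
    split_ifs with h
    · rw [PySem.List.slice_from _ (by positivity),
        show ((k : Int) + 1).toNat = k + 1 by omega]
    · have : mesa.length = k + 1 := by omega
      simp [List.drop_eq_nil_of_le, this]
  have hdecomp : mesa = mesa.take k ++ mesa.getD k [] :: mesa.drop (k + 1) := by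
    rw [List.getD_eq_getElem _ _ hk, ← List.drop_eq_getElem_cons hk, List.take_append_drop]
  have hsum : (mesa.map (fun r => r.sum)).sum
      = ((mesa.take k).map (fun r => r.sum)).sum + (mesa.getD k []).sum
        + ((mesa.drop (k + 1)).map (fun r => r.sum)).sum := by
    conv_lhs => rw [hdecomp]
    simp only [List.map_append, List.sum_append, List.map_cons, List.sum_cons]
    ring
  unfold joga_pedra
  rw [PySem.List.slice_to _ (by positivity), hpost, hget, sum_pontas_eq]
  simp only [Int.toNat_natCast, List.map_append, List.sum_append, List.map_cons, List.sum_cons,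
    List.map_nil, List.sum_nil]
  rw [hsum]
  ring

-- Python's repl expression in B equals A's ponta_que_entra, for every row
lemma repl_eq (pedra row : List Int) :
    (if PySem.List.pyGetD row 0 0 = PySem.List.pyGetD pedra 0 0 then
      (if PySem.List.pyGetD pedra 0 0 = PySem.List.pyGetD pedra 1 0 then
        [PySem.List.pyGetD pedra 0 0, PySem.List.pyGetD pedra 1 0]
      else [PySem.List.pyGetD pedra 1 0])
    else [PySem.List.pyGetD pedra 0 0]) = ponta_que_entra pedra row := by
  unfold ponta_que_entra
  by_cases h1 : PySem.List.pyGetD row 0 0 = PySem.List.pyGetD pedra 0 0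
  · by_cases h2 : PySem.List.pyGetD pedra 0 0 = PySem.List.pyGetD pedra 1 0
    · rw [if_pos h1, if_pos h2, if_neg (fun hc => hc.2 h2), if_pos ⟨h1.symm, h2⟩]
    · rw [if_pos h1, if_neg h2, if_pos ⟨h1.symm, h2⟩]
  · rw [if_neg h1, if_neg (fun hc => h1 hc.1.symm), if_neg (fun hc => h1 hc.1.symm)]

lemma find_indexs_eq (side : Int) (mesa : List (List Int)) :
    find_indexs side mesa
      = ((List.range mesa.length).filter
          (fun k => decide ((mesa.getD k []).length ≠ 0 ∧ PySem.List.pyGetD (mesa.getD k []) 0 0 = side))).map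
          (fun k : Nat => (k : Int)) := by
  unfold find_indexs
  rw [show ((mesa.length : Int)) = ((mesa.length : Nat) : Int) from rfl, PySem.List.pyRange_zero_nat,
    List.foldl_map]
  have hbody : ∀ (acc : List Int) (k : Nat), k ∈ List.range mesa.length →
      (if (PySem.List.pyGetD mesa (k : Int) []).length ≠ 0 ∧
          PySem.List.pyGetD (PySem.List.pyGetD mesa (k : Int) []) 0 0 = side
        then acc ++ [(k : Int)] else acc)
      = (if ((fun k : Nat => decide ((mesa.getD k []).length ≠ 0 ∧ PySem.List.pyGetD (mesa.getD k []) 0 0 = side)) k) = true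
          then acc ++ [((fun k : Nat => (k : Int)) k)] else acc) := by
    intro acc k _
    have hg : PySem.List.pyGetD mesa (k : Int) [] = mesa.getD k [] := by
      rw [PySem.List.pyGetD_of_nonneg _ _ (by positivity)]; simp
    simp [hg]
  rw [PySem.List.foldl_congr_mem _ _ _ _ hbody, PySem.List.foldl_append_if]
  simp

-- one side of B's scan equals A's fold over the matching indices of that side
lemma side_fold (pedra : List Int) (mesa : List (List Int)) (side : Int) (total : Int)
    (htotal : total = (mesa.map (fun r => r.sum)).sum) (st : Int × Int) :
    (find_indexs side mesa).foldl
      (fun (st : Int × Int) inx =>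
        if st.1 ≤ sum_pontas (joga_pedra pedra mesa inx) then
          (sum_pontas (joga_pedra pedra mesa inx), inx)
        else st) st
    = (PySem.List.enumerate mesa 0).foldl
      (fun (st : Int × Int) ir =>
        if ir.2 ≠ [] ∧ PySem.List.pyGetD ir.2 0 0 = side then
          (if st.1 ≤ total - ir.2.sum +
              (if PySem.List.pyGetD ir.2 0 0 = PySem.List.pyGetD pedra 0 0 then
                (if PySem.List.pyGetD pedra 0 0 = PySem.List.pyGetD pedra 1 0 then
                  [PySem.List.pyGetD pedra 0 0, PySem.List.pyGetD pedra 1 0]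
                else [PySem.List.pyGetD pedra 1 0])
              else [PySem.List.pyGetD pedra 0 0]).sum
            then (total - ir.2.sum +
              (if PySem.List.pyGetD ir.2 0 0 = PySem.List.pyGetD pedra 0 0 then
                (if PySem.List.pyGetD pedra 0 0 = PySem.List.pyGetD pedra 1 0 then
                  [PySem.List.pyGetD pedra 0 0, PySem.List.pyGetD pedra 1 0]
                else [PySem.List.pyGetD pedra 1 0])
              else [PySem.List.pyGetD pedra 0 0]).sum, ir.1)
            else st)
        else st) st := by
  rw [find_indexs_eq, List.foldl_map, List.foldl_filter,
    enumerate_eq_range ([] : List Int), List.foldl_map]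
  apply PySem.List.foldl_congr_mem
  intro acc k hk
  have hklt : k < mesa.length := List.mem_range.mp hk
  simp only [zero_add]
  by_cases hne : mesa.getD k [] = []
  · rw [if_neg (show ¬ (decide ((mesa.getD k []).length ≠ 0 ∧ PySem.List.pyGetD (mesa.getD k []) 0 0 = side) = true)
        from fun h => (of_decide_eq_true h).1 (by rw [hne]; rfl)),
      if_neg (show ¬ (mesa.getD k [] ≠ [] ∧ PySem.List.pyGetD (mesa.getD k []) 0 0 = side)
        from fun h => h.1 hne)]
  · by_cases hs : PySem.List.pyGetD (mesa.getD k []) 0 0 = side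
    · have hlen : (mesa.getD k []).length ≠ 0 := fun h => hne (List.length_eq_zero_iff.mp h)
      rw [if_pos (decide_eq_true (⟨hlen, hs⟩ :
            (mesa.getD k []).length ≠ 0 ∧ PySem.List.pyGetD (mesa.getD k []) 0 0 = side)),
        if_pos (show mesa.getD k [] ≠ [] ∧ PySem.List.pyGetD (mesa.getD k []) 0 0 = side
          from ⟨hne, hs⟩),
        joga_sum pedra mesa k hklt, repl_eq pedra (mesa.getD k []), htotal]
    · rw [if_neg (show ¬ (decide ((mesa.getD k []).length ≠ 0 ∧ PySem.List.pyGetD (mesa.getD k []) 0 0 = side) = true)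
          from fun h => hs (of_decide_eq_true h).2),
        if_neg (show ¬ (mesa.getD k [] ≠ [] ∧ PySem.List.pyGetD (mesa.getD k []) 0 0 = side)
          from fun h => hs h.2)]

lemma m_mais_ponto_eq_pvScore (pedra : List Int) (mesa : List (List Int)) :
    m_mais_ponto pedra mesa = pvScore pedra mesa ((mesa.map (fun r => r.sum)).sum) := by
  unfold m_mais_ponto pvScore
  rw [List.foldl_append]
  simp only [List.foldl_cons, List.foldl_nil]
  rw [side_fold pedra mesa _ _ rfl, side_fold pedra mesa _ _ rfl]

lemma m_mais_ponto_fst_nonneg (pedra : List Int) (mesa : List (List Int)) :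
    0 ≤ (m_mais_ponto pedra mesa).1 := by
  unfold m_mais_ponto
  generalize (find_indexs (PySem.List.pyGetD pedra 0 0) mesa
    ++ find_indexs (PySem.List.pyGetD pedra 1 0) mesa) = l
  suffices h : ∀ (st : Int × Int), 0 ≤ st.1 →
      0 ≤ (l.foldl (fun (st : Int × Int) inx =>
        if st.1 ≤ sum_pontas (joga_pedra pedra mesa inx) then
          (sum_pontas (joga_pedra pedra mesa inx), inx)
        else st) st).1 from h (0, 0) le_rfl
  induction l with
  | nil => intro st hst; simpa
  | cons x xs ih =>
    intro st hst
    simp only [List.foldl_cons]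
    split_ifs with h
    · exact ih _ (le_trans hst h)
    · exact ih _ hst

-- A's collection loop, abstractly: running max and the pieces attaining the final max
lemma argmax_fold {α : Type} (g : α → Int × Int) (l : List α) :
    ∀ (c : Int) (acc : List (α × Int × Int)),
    l.foldl (fun (st : Int × List (α × Int × Int)) p =>
        if st.1 < (g p).1 then ((g p).1, [(p, (g p).1, (g p).2)])
        else if (g p).1 = st.1 then (st.1, st.2 ++ [(p, (g p).1, (g p).2)])
        else st) (c, acc)
    = ((l.map (fun p => (g p).1)).foldl max c,
       (if (l.map (fun p => (g p).1)).foldl max c = c then acc else [])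
        ++ (l.filter (fun p => (g p).1 = (l.map (fun p => (g p).1)).foldl max c)).map
            (fun p => (p, g p))) := by
  induction l with
  | nil => intro c acc; simp
  | cons p ps ih =>
    intro c acc
    have hle : ∀ c' : Int, c' ≤ (ps.map (fun q => (g q).1)).foldl max c' :=
      fun c' => (PySem.List.le_foldl_max _ c').1
    simp only [List.foldl_cons, List.map_cons, List.filter_cons, decide_eq_true_eq]
    rcases lt_trichotomy c (g p).1 with hlt | heq | hgt
    · rw [if_pos hlt, ih]
      simp only [max_eq_right hlt.le]
      have hne : (ps.map (fun q => (g q).1)).foldl max (g p).1 ≠ c := by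
        intro h
        have h1 := hle (g p).1
        rw [h] at h1
        exact absurd (lt_of_lt_of_le hlt h1) (lt_irrefl c)
      refine Prod.ext rfl ?_
      rw [if_neg hne, List.nil_append]
      rcases eq_or_ne (g p).1 ((ps.map (fun q => (g q).1)).foldl max (g p).1) with hvM | hvM
      · rw [if_pos hvM.symm, if_pos hvM, List.map_cons, List.singleton_append]
      · rw [if_neg (fun h => hvM h.symm), if_neg hvM, List.nil_append]
    · rw [if_neg (by rw [← heq]; exact lt_irrefl c), if_pos heq.symm,
        ih c (acc ++ [(p, (g p).1, (g p).2)])]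
      simp only [show max c (g p).1 = c by rw [← heq, max_self]]
      refine Prod.ext rfl ?_
      rcases eq_or_ne ((ps.map (fun q => (g q).1)).foldl max c) c with hM | hM
      · rw [if_pos hM, if_pos hM, if_pos (heq.symm.trans hM.symm), List.map_cons,
          List.append_assoc, List.singleton_append]
      · rw [if_neg hM, if_neg hM, if_neg (fun h => hM (h.symm.trans heq.symm)), List.nil_append]
    · rw [if_neg (not_lt.mpr hgt.le), if_neg (ne_of_lt hgt), ih]
      simp only [max_eq_left hgt.le]
      refine Prod.ext rfl ?_
      rw [if_neg (show ¬ ((g p).1 = (ps.map (fun q => (g q).1)).foldl max c) from by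
        intro h
        have h1 := hle c
        rw [← h] at h1
        exact absurd h1 (not_le.mpr hgt))]

-- ===== VERDICT (by name: the statement is the Claim_ definition above) =====
theorem mapea_pedra_spec : Claim_equal_mapea_pedra := by
  intro mao mesa _hdom _hpre
  unfold Spec_mapea_pedra
  have hA : mapea_pedra mao mesa
      = (mao.filter (fun p => (m_mais_ponto p mesa).1
          = (mao.map (fun p => (m_mais_ponto p mesa).1)).foldl max 0)).map
          (fun p => (p, m_mais_ponto p mesa)) := by
    have h := argmax_fold (fun p => m_mais_ponto p mesa) mao 0 []
    calc mapea_pedra mao mesa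
        = (mao.foldl (fun (st : Int × List (List Int × Int × Int)) p =>
            if st.1 < ((fun p => m_mais_ponto p mesa) p).1 then
              (((fun p => m_mais_ponto p mesa) p).1,
               [(p, ((fun p => m_mais_ponto p mesa) p).1, ((fun p => m_mais_ponto p mesa) p).2)])
            else if ((fun p => m_mais_ponto p mesa) p).1 = st.1 then
              (st.1, st.2 ++ [(p, ((fun p => m_mais_ponto p mesa) p).1, ((fun p => m_mais_ponto p mesa) p).2)])
            else st) (0, [])).2 := rfl
      _ = _ := by rw [h]; simp
  have hscored : mao.map (fun pedra => (pedra, pvScore pedra mesa ((mesa.map (fun row => row.sum)).sum)))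
      = mao.map (fun p => (p, m_mais_ponto p mesa)) :=
    List.map_congr_left (fun p _ => by rw [← m_mais_ponto_eq_pvScore])
  have hB : mapea_pedra_alt mao mesa
      = ((mao.map (fun p => (p, m_mais_ponto p mesa))).filter
          (fun u => u.2.1 = (mao.map (fun p => (m_mais_ponto p mesa).1)).foldl max 0)) := by
    show (match mao.map (fun pedra => (pedra, pvScore pedra mesa ((mesa.map (fun row => row.sum)).sum))) with
      | [] => ([] : List (List Int × Int × Int))
      | t :: ts =>
        List.filter (fun u : List Int × Int × Int =>
            decide (u.2.1 = List.foldl (fun (acc : Int) (u : List Int × Int × Int) => max acc u.2.1) t.2.1 (t :: ts)))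
          (t :: ts))
      = _
    rw [hscored]
    cases mao with
    | nil => rfl
    | cons q qs =>
      simp only [List.map_cons]
      congr 1
      funext u
      congr 1
      -- B's max (seeded with the first score, over all scores) = A's max (seeded with 0)
      rw [show ((q, m_mais_ponto q mesa) :: qs.map (fun p => (p, m_mais_ponto p mesa))).foldl
            (fun acc u => max acc u.2.1) (m_mais_ponto q mesa).1
          = (qs.map (fun p => (m_mais_ponto p mesa).1)).foldl max
              (max (m_mais_ponto q mesa).1 (m_mais_ponto q mesa).1) by
            simp only [List.foldl_cons, List.foldl_map]]
      rw [show List.foldl max 0 ((m_mais_ponto q mesa).1 :: qs.map (fun p => (m_mais_ponto p mesa).1))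
          = (qs.map (fun p => (m_mais_ponto p mesa).1)).foldl max (max 0 (m_mais_ponto q mesa).1) by
            simp only [List.foldl_cons]]
      rw [max_self, max_eq_right (m_mais_ponto_fst_nonneg q mesa)]
  rw [hA, hB, List.filter_map]
  rfl
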